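-- pv_equiv track=rewrite | github.com/Beellee/sentiment-analysis | func.py | obtener_frecuencias
-- ===== SOURCE A (Python) =====
-- def obtener_frecuencias(dataset: list):
--
--     """
--         Obtiene las frecuencias de palabras en un dataset y el vocabulario único.
--         Args:
--             dataset (list): Lista de diccionarios que representan las filas del dataset.
--         Returns:
--             tuple: Una tupla que contiene dos elementos:
--                 - frecuencias (list): Lista de diccionarios que representan las frecuencias de palabras en cada tuit del dataset.
--                 - vocabulario (set): Conjunto de palabras únicas presentes en el dataset.
--     """
--
--     frecuencias = []  # Palabras y su frecuencia
--     vocabulario = set()  # Palabras únicas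
--
--     for tuit in dataset:
--
--         palabras = tuit['text'].split()  # Obtenemos las palabras del tuit actual
--
--         contador = {}  # Diccionario con las frecuencias de palabras del tuit
--
--         for palabra in palabras:
--             if palabra not in contador:
--                 contador[palabra] = 0  # Inicializamos la frecuencia de la palabra en 0
--             contador[palabra] += 1  # Actualizamos la frecuencia de la palabra
--
--             vocabulario.add(palabra)  # Agregamos la palabra al vocabulario
--         frecuencias.append(contador)  # Agregamos el diccionario de frecuencias a la lista
--     return frecuencias, vocabulario
-- ===== SOURCE B (Python) =====
-- def obtener_frecuencias(dataset: list):
--     # Count by scanning: each tweet's dict is a comprehension over the first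
--     # occurrences of its words, with the frequency obtained by list.count.
--     frecuencias = []
--     for tuit in dataset:
--         palabras = tuit['text'].split()
--         frecuencias.append({palabra: palabras.count(palabra)
--                             for i, palabra in enumerate(palabras)
--                             if palabra not in palabras[:i]})
--     # Vocabulary recomputed from the raw words in a separate comprehension pass.
--     vocabulario = {palabra for tuit in dataset for palabra in tuit['text'].split()}
--     return frecuencias, vocabulario
-- ===== Notes on version B (the rewrite author's own statement) =====
-- stated objective: alternative
-- what changed: A accumulates each tweet's counter incrementally word by word while adding to the vocabulary inline; B builds each tweet's dict as a comprehension over first occurrences using list.count full scans (no incremental counter at all), and recomputes the vocabulary from the raw words in a separate set-comprehension pass.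
import Mathlib
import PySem

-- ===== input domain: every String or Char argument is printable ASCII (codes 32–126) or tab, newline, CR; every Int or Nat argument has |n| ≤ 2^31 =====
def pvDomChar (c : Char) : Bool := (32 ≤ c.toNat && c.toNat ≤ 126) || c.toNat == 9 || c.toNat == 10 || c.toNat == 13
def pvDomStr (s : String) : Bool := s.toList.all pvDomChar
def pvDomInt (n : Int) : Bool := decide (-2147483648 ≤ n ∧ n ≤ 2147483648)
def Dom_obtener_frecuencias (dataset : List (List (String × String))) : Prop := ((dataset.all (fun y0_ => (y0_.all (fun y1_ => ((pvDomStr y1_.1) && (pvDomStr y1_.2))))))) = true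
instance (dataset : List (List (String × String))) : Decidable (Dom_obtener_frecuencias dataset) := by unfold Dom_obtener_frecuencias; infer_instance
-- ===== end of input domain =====

-- B drops A's incremental counter: each tweet's dict comes from a comprehension over first
-- occurrences valued by list.count full scans, and the vocabulary is recomputed from the raw
-- words in a separate set-comprehension pass; same results, quadratic per tweet instead of linear.


-- ===== PORT A =====
-- inner loop body: if palabra not in contador: contador[palabra] = 0; contador[palabra] += 1; vocabulario.add(palabra)
def pvStepPalabra (p : PySem.Dict String Int × PySem.Set String) (palabra : String) :
    PySem.Dict String Int × PySem.Set String :=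
  let contador := if p.1.contains palabra then p.1 else p.1.insert palabra 0
  let contador := contador.insert palabra (contador.getD palabra 0 + 1)
  (contador, PySem.Set.add p.2 palabra)

-- outer loop body: one tweet — split, count words (updating the vocabulary inline), append the counter
def pvStepTuit (st : List (PySem.Dict String Int) × PySem.Set String) (tuit : List (String × String)) :
    List (PySem.Dict String Int) × PySem.Set String :=
  let palabras := PySem.Str.split₀ ((PySem.Dict.mk tuit).getD "text" "")  -- tuit['text'] (Pre_ guarantees the key; default unreachable)
  let r := palabras.foldl pvStepPalabra (PySem.Dict.empty, st.2)
  (st.1 ++ [r.1], r.2)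

def obtener_frecuencias (dataset : List (List (String × String))) : (List (List (String × Int))) × List String :=
  let st := dataset.foldl pvStepTuit ([], PySem.Set.empty)
  (st.1.map PySem.Dict.items, st.2)

-- ===== PORT B =====
-- dict comprehension {palabra: palabras.count(palabra) for i, palabra in enumerate(palabras) if palabra not in palabras[:i]}
def pvContarAlt (palabras : List String) : PySem.Dict String Int :=
  (PySem.List.enumerate palabras).foldl
    (fun contador p =>
      if (PySem.List.slice palabras none (some p.1)).contains p.2 then contador
      else contador.insert p.2 ((PySem.List.count palabras p.2 : Int)))
    PySem.Dict.empty

def obtener_frecuencias_alt (dataset : List (List (String × String))) : (List (List (String × Int))) × List String :=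
  let frecuencias := dataset.map (fun tuit => pvContarAlt (PySem.Str.split₀ ((PySem.Dict.mk tuit).getD "text" "")))
  -- set comprehension {palabra for tuit in dataset for palabra in tuit['text'].split()}
  let vocabulario := dataset.foldl
    (fun v tuit => (PySem.Str.split₀ ((PySem.Dict.mk tuit).getD "text" "")).foldl PySem.Set.add v)
    PySem.Set.empty
  (frecuencias.map PySem.Dict.items, vocabulario)

-- ===== PRECONDITION & SPEC =====
-- Pre_ excludes datasets in which some tweet lacks the key 'text': there both A and B raise KeyError.
def Pre_obtener_frecuencias (dataset : List (List (String × String))) : Prop :=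
  ∀ tuit ∈ dataset, (PySem.Dict.mk tuit).contains "text" = true
instance (dataset : List (List (String × String))) : Decidable (Pre_obtener_frecuencias dataset) := by unfold Pre_obtener_frecuencias; infer_instance
def pvWitness_obtener_frecuencias : (List (List (String × String))) := [[("text", "a b a")], [("text", "b c")]]
def Spec_obtener_frecuencias (dataset : List (List (String × String))) (out : (List (List (String × Int))) × List String) : Prop := out = obtener_frecuencias_alt dataset
instance (dataset : List (List (String × String))) (out : (List (List (String × Int))) × List String) : Decidable (Spec_obtener_frecuencias dataset out) := by unfold Spec_obtener_frecuencias; infer_instance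

-- ===== CLAIM (what is proved, stated in full; the proofs are below) =====
def Claim_equal_obtener_frecuencias : Prop := ∀ (dataset : List (List (String × String))), Dom_obtener_frecuencias dataset → Pre_obtener_frecuencias dataset → Spec_obtener_frecuencias dataset (obtener_frecuencias dataset)

-- ===== LEMMAS AND PROOFS =====

-- abbreviation used only in the proofs: the word list of one tweet
def pvWords (tuit : List (String × String)) : List String :=
  PySem.Str.split₀ ((PySem.Dict.mk tuit).getD "text" "")

-- One step of A's inner loop equals an insert-increment step, plus a set add.
theorem pv_step_eq (d : PySem.Dict String Int) (v : PySem.Set String) (x : String) :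
    pvStepPalabra (d, v) x = (d.insert x (d.getD x 0 + 1), PySem.Set.add v x) := by
  unfold pvStepPalabra
  by_cases h : d.contains x = true
  · simp [h]
  · have h' : d.contains x = false := by simpa using h
    simp only [h', if_neg, Bool.false_eq_true, not_false_iff]
    rw [PySem.Dict.getD_insert_self, PySem.Dict.insert_insert_self,
      PySem.Dict.getD_of_not_contains d 0 h']

-- A's inner word loop from (d, v) is the counting fold on d, and v updated with the words.
theorem pv_inner (palabras : List String) (d : PySem.Dict String Int) (v : PySem.Set String) :
    palabras.foldl pvStepPalabra (d, v)
    = (palabras.foldl (fun contador palabra => contador.insert palabra (contador.getD palabra 0 + 1)) d,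
       palabras.foldl PySem.Set.add v) := by
  induction palabras generalizing d v with
  | nil => rfl
  | cons x xs ih => rw [List.foldl_cons, pv_step_eq, ih, List.foldl_cons, List.foldl_cons]

-- One step of A's outer loop: append this tweet's counter, fold its words into the vocabulary.
theorem pv_tuit_eq (acc : List (PySem.Dict String Int)) (v : PySem.Set String) (t : List (String × String)) :
    pvStepTuit (acc, v) t = (acc ++ [PySem.Dict.counter (pvWords t)], (pvWords t).foldl PySem.Set.add v) := by
  simp only [pvStepTuit, pvWords, pv_inner, PySem.Dict.foldl_insert_getD_add_one_eq_counter]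

-- A's outer loop from (acc, v) appends the per-tweet counters and folds all words into v.
theorem pv_outer (dataset : List (List (String × String))) (acc : List (PySem.Dict String Int)) (v : PySem.Set String) :
    dataset.foldl pvStepTuit (acc, v)
    = (acc ++ dataset.map (fun tuit => PySem.Dict.counter (pvWords tuit)),
       dataset.foldl (fun v tuit => (pvWords tuit).foldl PySem.Set.add v) v) := by
  induction dataset generalizing acc v with
  | nil => simp
  | cons t ts ih =>
    rw [List.foldl_cons, pv_tuit_eq, ih, List.foldl_cons, List.map_cons]
    simp

-- Invariant of B's comprehension fold: having consumed the prefix `pre` of the word list,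
-- the dict's items are the first occurrences seen so far, each valued by its count in the full list.
theorem pv_alt_aux (full : List String) (suf : List String) :
    ∀ (pre : List String) (d : PySem.Dict String Int), full = pre ++ suf →
    d.items = (PySem.Set.ofList pre).map (fun w => (w, (List.count w full : Int))) →
    ((PySem.List.enumerate suf (pre.length : Int)).foldl
      (fun contador p =>
        if (PySem.List.slice full none (some p.1)).contains p.2 then contador
        else contador.insert p.2 ((PySem.List.count full p.2 : Int))) d).items
    = (PySem.Set.ofList full).map (fun w => (w, (List.count w full : Int))) := by
  induction suf with
  | nil => intro pre d hfull hd; simpa [hfull] using hd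
  | cons y ys ih =>
    intro pre d hfull hd
    rw [PySem.List.enumerate_cons, List.foldl_cons]
    have hslice : PySem.List.slice full none (some (pre.length : Int)) = pre := by
      rw [PySem.List.slice_to_natCast, hfull, List.take_left]
    have hcast : (pre.length : Int) + 1 = ((pre ++ [y]).length : Int) := by
      simp [List.length_append]
    have hfull' : full = (pre ++ [y]) ++ ys := by simp [hfull]
    by_cases hy : y ∈ pre
    · have hc : pre.contains y = true := List.elem_eq_true_of_mem hy
      rw [hslice, if_pos hc, hcast]
      apply ih (pre ++ [y]) d hfull'
      rw [hd, PySem.Set.ofList_append_singleton,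
        PySem.Set.add_of_mem ((PySem.Set.mem_ofList pre y).mpr hy)]
    · have hc : pre.contains y = false := by
        simp only [List.contains_eq_mem, decide_eq_false_iff_not]; exact hy
      rw [hslice, if_neg (by simp only [hc]; exact Bool.false_ne_true), hcast]
      apply ih (pre ++ [y]) _ hfull'
      have hdc : d.contains y = false := by
        rw [← Bool.not_eq_true, PySem.Dict.contains_iff_mem_keys]
        show y ∉ d.items.map (·.1)
        rw [hd, List.map_map]
        simpa using fun hmem => hy ((PySem.Set.mem_ofList pre y).mp hmem)
      rw [PySem.Dict.items_insert_of_not_contains d _ hdc, hd,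
        PySem.Set.ofList_append_singleton, PySem.List.count_eq]
      have hyn : y ∉ PySem.Set.ofList pre := fun h => hy ((PySem.Set.mem_ofList pre y).mp h)
      rw [PySem.Set.add_eq_ite, if_neg hyn, List.map_append, List.map_singleton]

-- B's comprehension dict equals A's incrementally built counter.
theorem pv_contar_alt_eq_counter (palabras : List String) :
    pvContarAlt palabras = PySem.Dict.counter palabras := by
  apply PySem.Dict.ext
  rw [PySem.Dict.items_counter]
  exact pv_alt_aux palabras palabras [] PySem.Dict.empty rfl rfl

-- ===== VERDICT (by name: the statement is the Claim_ definition above) =====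
theorem obtener_frecuencias_spec : Claim_equal_obtener_frecuencias := by
  intro dataset _ _
  show obtener_frecuencias dataset = obtener_frecuencias_alt dataset
  unfold obtener_frecuencias obtener_frecuencias_alt
  rw [pv_outer]
  simp only [List.nil_append]
  simp only [pvWords, pv_contar_alt_eq_counter]
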